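-- pv_equiv track=rewrite | github.com/DiegoBasgal/Python | Ngram_test/ngran.py | gram
-- ===== SOURCE A (Python) =====
-- def gram(word):
--     di=[]
--
--     for i in range(len(word)-1):
--         a = word[i] + word[i + 1]
--         if a in di:
--             di.remove(a)
--         else:
--             di.append(a)
--     return di
-- ===== SOURCE B (Python) =====
-- def gram(word):
--     # Count bigrams in one dict pass, then a reverse scan picks each
--     # odd-count bigram at its last occurrence (first sight in reverse), then reverse.
--     bigrams = [word[i] + word[i + 1] for i in range(len(word) - 1)]
--     cnt = {}
--     for b in bigrams:
--         cnt[b] = cnt.get(b, 0) + 1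
--     out = []
--     seen = set()
--     for b in reversed(bigrams):
--         if b not in seen:
--             seen.add(b)
--             if cnt[b] % 2 == 1:
--                 out.append(b)
--     out.reverse()
--     return out
-- ===== Notes on version B (the rewrite author's own statement) =====
-- stated objective: alternative
-- what changed: Replaces the toggle-in-a-list (membership test and remove on a growing list per bigram) with one hash-count pass plus one reverse scan with a seen-set that emits each odd-count bigram at its last occurrence.
import Mathlib
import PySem

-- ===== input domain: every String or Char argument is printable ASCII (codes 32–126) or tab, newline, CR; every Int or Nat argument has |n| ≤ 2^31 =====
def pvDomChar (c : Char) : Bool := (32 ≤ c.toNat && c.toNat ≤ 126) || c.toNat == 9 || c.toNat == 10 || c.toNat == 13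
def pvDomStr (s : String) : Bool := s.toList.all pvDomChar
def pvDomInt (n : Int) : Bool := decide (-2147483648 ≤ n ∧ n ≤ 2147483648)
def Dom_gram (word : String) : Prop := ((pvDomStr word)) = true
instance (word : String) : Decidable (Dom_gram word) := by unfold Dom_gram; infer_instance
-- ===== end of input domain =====

-- B replaces A's toggle-in-a-list with one counting pass plus a reverse scan
-- emitting each odd-count bigram at its last occurrence (objective: alternative).


-- ===== PORT A =====
-- A-side helper: the loop body — 'if a in di: di.remove(a) else: di.append(a)'
def gramStep (di : List String) (a : String) : List String :=
  if a ∈ di then (PySem.List.remove? di a).getD di else di ++ [a]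

-- 'for i in range(len(word)-1): a = word[i] + word[i+1]; …'; the indices are always
-- in range, so the none branches of pyGet? are unreachable.
def gram (word : String) : List String :=
  (PySem.List.pyRange 0 (PySem.Str.len word - 1) 1).foldl
    (fun di i =>
      match PySem.Str.pyGet? word i, PySem.Str.pyGet? word (i + 1) with
      | some c, some d => gramStep di (String.ofList [c, d])
      | _, _ => di)
    []

-- ===== PORT B =====
-- B-side helper: bigrams = [word[i] + word[i+1] for i in range(len(word)-1)]
-- (indices always in range, so the none branches are unreachable)
def gramBigrams (word : String) : List String :=
  (PySem.List.pyRange 0 (PySem.Str.len word - 1) 1).map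
    (fun i =>
      match PySem.Str.pyGet? word i with
      | none => ""
      | some c =>
        match PySem.Str.pyGet? word (i + 1) with
        | none => ""
        | some d => String.ofList [c, d])

def gram_alt (word : String) : List String :=
  let bigrams := gramBigrams word
  -- cnt[b] = cnt.get(b, 0) + 1
  let cnt := bigrams.foldl (fun d b => d.insert b (d.getD b 0 + 1))
      (PySem.Dict.empty : PySem.Dict String Int)
  -- for b in reversed(bigrams): if b not in seen: seen.add(b); if cnt[b] % 2 == 1: out.append(b)
  -- (cnt[b]: the key is always present, so the lookup is total via get?/getD)
  let res := bigrams.reverse.foldl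
    (fun (p : List String × PySem.Set String) b =>
      if b ∈ p.2 then p
      else ((if PySem.Int.mod ((cnt.get? b).getD 0) 2 == 1 then p.1 ++ [b] else p.1),
            PySem.Set.add p.2 b))
    ([], PySem.Set.empty)
  res.1.reverse

-- ===== PRECONDITION & SPEC =====
def Spec_gram (word : String) (out : List String) : Prop := out = gram_alt word
instance (word : String) (out : List String) : Decidable (Spec_gram word out) := by unfold Spec_gram; infer_instance

-- ===== CLAIM (what is proved, stated in full; the proofs are below) =====
def Claim_equal_gram : Prop := ∀ (word : String), Dom_gram word → Spec_gram word (gram word)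

-- ===== LEMMAS AND PROOFS =====

-- the toggle step, in erase form
theorem gramStep_eq (di : List String) (a : String) :
    gramStep di a = if a ∈ di then di.erase a else di ++ [a] := by
  unfold gramStep
  by_cases h : a ∈ di
  · simp [h, PySem.List.remove?_eq_some_erase di a h]
  · simp [h]

-- A reduces to a fold of gramStep over the bigram list
theorem gram_eq_fold (word : String) :
    gram word = (gramBigrams word).foldl gramStep [] := by
  unfold gram gramBigrams
  rw [List.foldl_map]
  apply PySem.List.foldl_congr_mem
  intro di i hi
  rw [PySem.List.mem_pyRange_one] at hi
  obtain ⟨h0, h1⟩ := hi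
  rw [PySem.Str.len_eq] at h1
  obtain ⟨n, rfl⟩ : ∃ n : ℕ, i = (n : ℤ) := ⟨i.toNat, (Int.toNat_of_nonneg h0).symm⟩
  have hn : n + 1 < word.toList.length := by omega
  have e1 : PySem.Str.pyGet? word (n : ℤ) = some (word.toList[n]'(by omega)) := by
    rw [PySem.Str.pyGet?_natCast]
    exact List.getElem?_eq_getElem _
  have e2 : PySem.Str.pyGet? word ((n : ℤ) + 1) = some (word.toList[n + 1]'hn) := by
    have hc : (n : ℤ) + 1 = ((n + 1 : ℕ) : ℤ) := by push_cast; ring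
    rw [hc, PySem.Str.pyGet?_natCast]
    exact List.getElem?_eq_getElem _
  rw [e1, e2]

-- the toggle step keeps the list duplicate-free
theorem toggleStep_nodup (di : List String) (a : String) (h : di.Nodup) :
    (gramStep di a).Nodup := by
  rw [gramStep_eq]
  by_cases ha : a ∈ di
  · rw [if_pos ha]; exact h.erase a
  · rw [if_neg ha]
    simp [List.nodup_append, h]
    exact fun x hx e => ha (e ▸ hx)

theorem toggle_nodup (m : List String) (di : List String) (h : di.Nodup) :
    (m.foldl gramStep di).Nodup := by
  induction m generalizing di with
  | nil => exact h
  | cons a t ih => exact ih _ (toggleStep_nodup di a h)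

-- membership in the toggled list is parity of the count
theorem mem_toggle (m : List String) (di : List String) (h : di.Nodup) (b : String) :
    (b ∈ m.foldl gramStep di) ↔ ((if b ∈ di then 1 else 0) + m.count b) % 2 = 1 := by
  induction m generalizing di with
  | nil => by_cases hb : b ∈ di <;> simp [hb]
  | cons a t ih =>
    have hn := toggleStep_nodup di a h
    have hmem : (b ∈ gramStep di a) ↔ (if a = b then ¬ (b ∈ di) else b ∈ di) := by
      rw [gramStep_eq]
      by_cases hab : a = b
      · subst hab
        by_cases hb : a ∈ di
        · rw [if_pos hb, if_pos rfl, h.erase_eq_filter]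
          simp [List.mem_filter, hb]
        · rw [if_neg hb, if_pos rfl]
          simp [hb]
      · have hba : b ≠ a := fun e => hab e.symm
        by_cases hb : a ∈ di
        · rw [if_pos hb, if_neg hab, h.erase_eq_filter]
          simp [List.mem_filter, hba]
        · rw [if_neg hb, if_neg hab]
          simp [hba]
    simp only [List.foldl_cons, List.count_cons]
    rw [ih _ hn]
    by_cases hab : a = b
    · subst hab
      by_cases hb : a ∈ di
      · have hm : a ∉ gramStep di a := by rw [hmem]; simp [hb]
        simp only [if_neg hm, if_pos hb, BEq.rfl, if_pos]
        omega
      · have hm : a ∈ gramStep di a := by rw [hmem]; simp [hb]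
        simp only [if_pos hm, if_neg hb, BEq.rfl, if_pos]
        omega
    · have hm : (b ∈ gramStep di a) ↔ b ∈ di := by rw [hmem, if_neg hab]
      simp [hm, hab]

-- B's inner loop, as a pure recursion on the reversed bigram list
def pvCollect (q : String → Bool) : List String → List String → List String
  | [], _ => []
  | b :: t, seen =>
    if b ∈ seen then pvCollect q t seen
    else (if q b then [b] else []) ++ pvCollect q t (PySem.Set.add seen b)

theorem fold_collect (q : String → Bool) (l : List String) (out seen : List String) :
    (l.foldl
      (fun (p : List String × PySem.Set String) b =>
        if b ∈ p.2 then p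
        else ((if q b then p.1 ++ [b] else p.1), PySem.Set.add p.2 b))
      (out, seen)).1 = out ++ pvCollect q l seen := by
  induction l generalizing out seen with
  | nil => simp [pvCollect]
  | cons b t ih =>
    simp only [List.foldl_cons, pvCollect]
    by_cases hb : b ∈ seen
    · simp [hb, ih]
    · by_cases hq : q b <;> simp [hb, hq, ih]

-- the key lemma: collecting unseen odd-count elements along l equals the toggle fold
-- of l.reverse, restricted to unseen elements, reversed
theorem collect_eq (l : List String) (seen : List String) (q : String → Bool)
    (hq : ∀ b, b ∉ seen → (q b ↔ l.reverse.count b % 2 = 1)) :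
    pvCollect q l seen
      = ((l.reverse.foldl gramStep []).filter (fun x => decide (x ∉ seen))).reverse := by
  induction l generalizing seen with
  | nil => simp [pvCollect]
  | cons b t ih =>
    have hrev : (b :: t).reverse = t.reverse ++ [b] := by simp
    have hfold : (b :: t).reverse.foldl gramStep []
        = gramStep (t.reverse.foldl gramStep []) b := by
      rw [hrev, List.foldl_append]; rfl
    have hY : (t.reverse.foldl gramStep []).Nodup := toggle_nodup _ _ List.nodup_nil
    have hYmem : (b ∈ t.reverse.foldl gramStep []) ↔ t.reverse.count b % 2 = 1 := by
      simpa using mem_toggle t.reverse [] List.nodup_nil b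
    simp only [pvCollect]
    rw [hfold, gramStep_eq]
    by_cases hb : b ∈ seen
    · rw [if_pos hb, ih seen (fun b' hb' => by
        have hne : ¬ (b = b') := fun hh => hb' (hh ▸ hb)
        simpa [hrev, List.count_append, List.count_singleton, hne] using hq b' hb')]
      by_cases hm : b ∈ t.reverse.foldl gramStep []
      · rw [if_pos hm, hY.erase_eq_filter, List.filter_filter]
        congr 1
        apply List.filter_congr
        intro x _
        by_cases hx : x = b
        · subst hx; simp [hb]
        · simp [hx]
      · rw [if_neg hm, List.filter_append]
        simp [hb]
    · have hadd : PySem.Set.add seen b = seen ++ [b] := PySem.Set.add_of_not_mem hb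
      rw [if_neg hb, hadd, ih (seen ++ [b]) (fun b' hb' => by
        have hb'1 : b' ∉ seen := fun hh => hb' (by simp [hh])
        have hne : ¬ (b = b') := fun hh => hb' (by simp [hh.symm])
        simpa [hrev, List.count_append, List.count_singleton, hne] using hq b' hb'1)]
      have hqb' := hq b hb
      have hcnt : (b :: t).reverse.count b = t.reverse.count b + 1 := by
        simp [hrev, List.count_append]
      rw [hcnt] at hqb'
      by_cases hqb : q b
      · have hodd := hqb'.1 hqb
        have hm : b ∉ t.reverse.foldl gramStep [] := by rw [hYmem]; omega
        rw [if_pos hqb, if_neg hm, List.filter_append]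
        have h1 : List.filter (fun x => decide (x ∉ seen)) [b] = [b] := by simp [hb]
        rw [h1, List.reverse_append]
        have hfe : List.filter (fun x => decide (x ∉ seen ++ [b])) (t.reverse.foldl gramStep [])
            = List.filter (fun x => decide (x ∉ seen)) (t.reverse.foldl gramStep []) := by
          apply List.filter_congr
          intro x hx
          have hxb : x ≠ b := fun e => hm (e ▸ hx)
          simp [List.mem_append, hxb]
        rw [hfe]
        simp
      · have h2 : ¬ ((t.reverse.count b + 1) % 2 = 1) := fun hh => hqb (hqb'.2 hh)
        have hm : b ∈ t.reverse.foldl gramStep [] := by rw [hYmem]; omega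
        rw [if_neg hqb, if_pos hm, hY.erase_eq_filter, List.filter_filter, List.nil_append]
        have hfe : List.filter (fun x => decide (x ∉ seen ++ [b])) (t.reverse.foldl gramStep [])
            = List.filter (fun x => decide (x ∉ seen) && (x != b)) (t.reverse.foldl gramStep []) := by
          apply List.filter_congr
          intro x _
          by_cases hx : x = b
          · subst hx; simp
          · simp [hx, List.mem_append]
        rw [hfe]

-- ===== VERDICT (by name: the statement is the Claim_ definition above) =====
theorem gram_spec : Claim_equal_gram := by
  unfold Claim_equal_gram Spec_gram
  intro word _
  rw [gram_eq_fold]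
  have hcnt : ∀ b : String,
      ((((gramBigrams word).foldl (fun d b => d.insert b (d.getD b 0 + 1))
        (PySem.Dict.empty : PySem.Dict String Int)).get? b).getD 0)
        = ((gramBigrams word).count b : ℤ) := by
    intro b
    rw [← PySem.Dict.getD_eq_get?_getD,
      PySem.Dict.getD_foldl_insert_add_one, PySem.Dict.getD_empty, zero_add]
  have hp : ∀ b : String,
      (PySem.Int.mod ((((gramBigrams word).foldl (fun d b => d.insert b (d.getD b 0 + 1))
        (PySem.Dict.empty : PySem.Dict String Int)).get? b).getD 0) 2 == 1)
        = decide ((gramBigrams word).count b % 2 = 1) := by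
    intro b
    rw [hcnt b]
    have hm : PySem.Int.mod ((gramBigrams word).count b : ℤ) 2
        = (((gramBigrams word).count b % 2 : ℕ) : ℤ) := by
      exact_mod_cast PySem.Int.mod_natCast ((gramBigrams word).count b) 2
    rw [hm]
    rcases Nat.mod_two_eq_zero_or_one ((gramBigrams word).count b) with h | h <;>
      rw [h] <;> decide
  show _ = gram_alt word
  simp only [gram_alt]
  simp only [hp]
  rw [fold_collect (fun b => decide ((gramBigrams word).count b % 2 = 1))
      (gramBigrams word).reverse [] PySem.Set.empty, List.nil_append,
    collect_eq (gramBigrams word).reverse PySem.Set.empty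
      (fun b => decide ((gramBigrams word).count b % 2 = 1))
      (fun b _ => by simp [List.reverse_reverse])]
  simp [PySem.Set.empty]
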